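-- pv_equiv track=rewrite | github.com/olimay/duel-simulator | cards.py | draw_hand
-- ===== SOURCE A (Python) =====
-- MAX_HAND = 6
--
-- def draw_card(deck, subdeck = "attack") -> tuple:
--   if len(deck[subdeck]) == 0:
--     return (None, deck)
--   card = deck[subdeck].pop()
--   return (card, deck)
--
-- def draw_hand(hand, deck, subdeck, max_cards = MAX_HAND):
--   h = hand
--   d = deck
--   for i in range(len(hand),max_cards):
--     c, d = draw_card(d, subdeck)
--     if not c is None:
--       h += [c]
--     else:
--       break
--   return h, d
-- ===== SOURCE B (Python) =====
-- MAX_HAND = 6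
--
-- def draw_hand(hand, deck, subdeck, max_cards = MAX_HAND):
--   need = max_cards - len(hand)
--   if need > 0:
--     sub = deck[subdeck]
--     n = min(need, len(sub))
--     if n > 0:
--       cut = len(sub) - n
--       hand += sub[cut:][::-1]
--       deck[subdeck] = sub[:cut]
--   return hand, deck
-- ===== Notes on version B (the rewrite author's own statement) =====
-- stated objective: simpler
-- what changed: Replaces the pop-one-card-at-a-time loop (and the draw_card helper) with a single count-and-slice step: compute how many cards to draw, append the reversed tail slice of the subdeck to the hand, and truncate the subdeck.
import Mathlib
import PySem

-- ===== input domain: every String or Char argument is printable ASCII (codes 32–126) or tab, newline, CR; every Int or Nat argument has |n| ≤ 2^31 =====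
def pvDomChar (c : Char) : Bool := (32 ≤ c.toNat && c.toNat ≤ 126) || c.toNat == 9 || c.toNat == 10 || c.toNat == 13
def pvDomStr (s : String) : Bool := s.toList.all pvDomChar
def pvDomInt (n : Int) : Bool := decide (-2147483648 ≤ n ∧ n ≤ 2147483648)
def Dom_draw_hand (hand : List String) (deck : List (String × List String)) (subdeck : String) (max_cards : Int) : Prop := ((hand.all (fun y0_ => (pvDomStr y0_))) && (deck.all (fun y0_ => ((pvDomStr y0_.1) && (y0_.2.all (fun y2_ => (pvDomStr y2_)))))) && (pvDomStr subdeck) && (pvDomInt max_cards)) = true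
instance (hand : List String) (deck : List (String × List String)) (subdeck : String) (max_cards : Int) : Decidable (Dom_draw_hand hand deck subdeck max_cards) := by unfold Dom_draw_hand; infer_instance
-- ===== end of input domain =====

-- B replaces A's pop-one-at-a-time loop with a single count-and-slice step (simpler decomposition).
-- Equivalence is about the RETURN value; both Pythons mutate hand and deck[subdeck] identically at the
-- dict level (B rebinds deck[subdeck] to a fresh list where A truncates the same list object in place).

-- ===== PORT A =====
-- assoc-list write of first matching key (Python dict entry update; key is present where it is used)
def alSet : List (String × List String) → String → List String → List (String × List String)
  | [], _, _ => []
  | (k, v) :: rest, key, new =>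
    if k == key then (k, new) :: rest else (k, v) :: alSet rest key new

-- transliteration of draw_card; the `none` lookup branch is Python's KeyError (excluded by Pre_)
def draw_card (deck : List (String × List String)) (subdeck : String) :
    Option String × List (String × List String) :=
  match List.lookup subdeck deck with
  | none => (none, deck)            -- KeyError in Python
  | some [] => (none, deck)         -- len(deck[subdeck]) == 0
  | some (x :: xs) =>
      (some ((x :: xs).getLast (by simp)), alSet deck subdeck (x :: xs).dropLast)

-- the for-loop of A: fuel = number of iterations of range(len(hand), max_cards)
def drawLoopA : Nat → List String → List (String × List String) → String →
    List String × List (String × List String)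
  | 0, h, d, _ => (h, d)
  | Nat.succ n, h, d, s =>
    match draw_card d s with
    | (some c, d') => drawLoopA n (h ++ [c]) d' s
    | (none, d') => (h, d')         -- break

def draw_hand (hand : List String) (deck : List (String × List String)) (subdeck : String) (max_cards : Int) : List String × (List (String × List String)) :=
  drawLoopA (max_cards - (hand.length : Int)).toNat hand deck subdeck

-- ===== PORT B =====
def draw_hand_alt (hand : List String) (deck : List (String × List String)) (subdeck : String) (max_cards : Int) : List String × (List (String × List String)) :=
  let need := max_cards - (hand.length : Int)
  if need > 0 then
    match List.lookup subdeck deck with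
    | none => (hand, deck)          -- KeyError in Python; excluded by Pre_
    | some sub =>
      let n := min need (sub.length : Int)
      if n > 0 then
        let cut := sub.length - n.toNat
        (hand ++ (sub.drop cut).reverse, alSet deck subdeck (sub.take cut))
      else (hand, deck)
  else (hand, deck)

-- ===== PRECONDITION & SPEC =====
-- Pre_ excludes exactly the inputs where Python raises KeyError: the loop runs (hand shorter than
-- max_cards) but subdeck is not a key of deck.
def Pre_draw_hand (hand : List String) (deck : List (String × List String)) (subdeck : String) (max_cards : Int) : Prop :=
  (hand.length : Int) < max_cards → (List.lookup subdeck deck).isSome = true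
instance (hand : List String) (deck : List (String × List String)) (subdeck : String) (max_cards : Int) : Decidable (Pre_draw_hand hand deck subdeck max_cards) := by unfold Pre_draw_hand; infer_instance

def pvWitness_draw_hand : List String × (List (String × List String)) × String × Int :=
  (["a"], [("attack", ["x", "y", "z"])], "attack", 6)

def Spec_draw_hand (hand : List String) (deck : List (String × List String)) (subdeck : String) (max_cards : Int) (out : List String × (List (String × List String))) : Prop := out = draw_hand_alt hand deck subdeck max_cards
instance (hand : List String) (deck : List (String × List String)) (subdeck : String) (max_cards : Int) (out : List String × (List (String × List String))) : Decidable (Spec_draw_hand hand deck subdeck max_cards out) := by unfold Spec_draw_hand; infer_instance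

-- ===== CLAIM (what is proved, stated in full; the proofs are below) =====
def Claim_equal_draw_hand : Prop := ∀ (hand : List String) (deck : List (String × List String)) (subdeck : String) (max_cards : Int), Dom_draw_hand hand deck subdeck max_cards → Pre_draw_hand hand deck subdeck max_cards → Spec_draw_hand hand deck subdeck max_cards (draw_hand hand deck subdeck max_cards)

-- ===== LEMMAS AND PROOFS =====

theorem alSet_self (d : List (String × List String)) (k : String) (v : List String)
    (h : List.lookup k d = some v) : alSet d k v = d := by
  induction d with
  | nil => simp [alSet]
  | cons p rest ih =>
    obtain ⟨k', v'⟩ := p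
    by_cases hk : k = k'
    · subst hk
      simp [List.lookup] at h
      simp [alSet, h]
    · have hb : (k == k') = false := by simp [hk]
      have hb' : (k' == k) = false := by simp; exact fun e => hk e.symm
      simp [List.lookup, hb] at h
      simp [alSet, hb', ih h]

theorem lookup_alSet (d : List (String × List String)) (k : String) (v w : List String)
    (h : List.lookup k d = some v) : List.lookup k (alSet d k w) = some w := by
  induction d with
  | nil => simp [List.lookup] at h
  | cons p rest ih =>
    obtain ⟨k', v'⟩ := p
    by_cases hk : k = k'
    · subst hk
      simp [alSet]
    · have hb : (k == k') = false := by simp [hk]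
      have hb' : (k' == k) = false := by simp; exact fun e => hk e.symm
      simp [List.lookup, hb] at h
      simp [alSet, hb', List.lookup, hb, ih h]

theorem alSet_alSet (d : List (String × List String)) (k : String) (v w : List String) :
    alSet (alSet d k v) k w = alSet d k w := by
  induction d with
  | nil => simp [alSet]
  | cons p rest ih =>
    obtain ⟨k', v'⟩ := p
    by_cases hk : (k' == k) = true
    · simp [alSet, hk]
    · simp [alSet, hk, ih]

theorem loopA_spec (n : Nat) (h : List String) (d : List (String × List String))
    (s : String) (sub : List String) (hl : List.lookup s d = some sub) :
    drawLoopA n h d s =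
      (h ++ (sub.drop (sub.length - min n sub.length)).reverse,
       alSet d s (sub.take (sub.length - min n sub.length))) := by
  induction n generalizing h d sub with
  | zero =>
    simp [drawLoopA, alSet_self d s sub hl]
  | succ n ih =>
    match sub with
    | [] =>
      simp [drawLoopA, draw_card, hl, alSet_self d s [] hl]
    | x :: xs =>
      have hne : x :: xs ≠ [] := by simp
      have hstep : drawLoopA (n + 1) h d s
          = drawLoopA n (h ++ [(x :: xs).getLast hne]) (alSet d s (x :: xs).dropLast) s := by
        simp [drawLoopA, draw_card, hl]
      have hcat : (x :: xs).dropLast ++ [(x :: xs).getLast hne] = x :: xs :=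
        List.dropLast_append_getLast hne
      generalize hgc : (x :: xs).getLast hne = c at hstep hcat
      generalize hgd : (x :: xs).dropLast = dl at hstep hcat
      rw [hstep, ih _ _ _ (lookup_alSet d s (x :: xs) dl hl), alSet_alSet, ← hcat]
      have hlen : (dl ++ [c]).length = dl.length + 1 := by simp
      have hij : (dl ++ [c]).length - min (n + 1) (dl ++ [c]).length
          = dl.length - min n dl.length := by simp only [hlen]; omega
      have hle : (dl ++ [c]).length - min (n + 1) (dl ++ [c]).length ≤ dl.length := by
        simp only [hlen]; omega
      rw [List.drop_append_of_le_length hle, List.take_append_of_le_length hle, hij]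
      simp

-- ===== VERDICT (by name: the statement is the Claim_ definition above) =====
theorem draw_hand_spec : Claim_equal_draw_hand := by
  intro hand deck subdeck max_cards _ hpre
  unfold Spec_draw_hand draw_hand draw_hand_alt
  by_cases hneed : (0 : Int) < max_cards - (hand.length : Int)
  · have hlt : (hand.length : Int) < max_cards := by omega
    obtain ⟨sub, hl⟩ := Option.isSome_iff_exists.mp (hpre hlt)
    rw [loopA_spec _ hand deck subdeck sub hl]
    simp only [hl, hneed, if_pos]
    by_cases hn : (0 : Int) < min (max_cards - (hand.length : Int)) (sub.length : Int)
    · have habs : min (max_cards - (hand.length : Int)).toNat sub.length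
          = (min (max_cards - (hand.length : Int)) (sub.length : Int)).toNat := by
        omega
      simp only [if_pos hn, habs]
    · -- sub is empty: both sides are (hand, deck)
      have hz : sub.length = 0 := by omega
      have hsub : sub = [] := List.length_eq_zero_iff.mp hz
      subst hsub
      simp [alSet_self deck subdeck [] hl]
  · -- no iterations: both sides are (hand, deck)
    have hf : (max_cards - (hand.length : Int)).toNat = 0 := by omega
    simp only [hf, drawLoopA]
    rw [if_neg hneed]
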